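-- pv_equiv track=rewrite | github.com/Sweet-Jasmine28/PSP-BRQ | IndexBuilder.py | get_prefix_codes
-- ===== SOURCE A (Python) =====
-- def get_prefix_codes(bit_str):
--     """
--     根据输入的二进制字符串生成前缀码列表。
--     例如，对于 "011001"，生成：
--       011001
--       01100*
--       0110**
--       011***
--       01****
--       0*****
--
--     参数：
--     - bit_str: 输入的二进制字符串
--
--     返回：
--     - 前缀码列表，每个元素为一个字符串
--     """
--     prefix_codes = []
--     n = len(bit_str)
--     for i in range(n):
--         prefix = bit_str[:n - i]
--         suffix = '*' * i
--         prefix_codes.append(prefix + suffix)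
--     return prefix_codes
-- ===== SOURCE B (Python) =====
-- def get_prefix_codes(bit_str):
--     # Incremental: keep a mutable buffer, mask one more rightmost char per step.
--     buf = list(bit_str)
--     n = len(buf)
--     if n == 0:
--         return []
--     codes = [''.join(buf)]
--     for i in range(1, n):
--         buf[n - i] = '*'
--         codes.append(''.join(buf))
--     return codes
-- ===== Notes on version B (the rewrite author's own statement) =====
-- stated objective: alternative
-- what changed: B maintains one mutable character buffer and derives each code from the previous by a single in-place '*' write plus a join, instead of re-slicing the original string and rebuilding a fresh suffix each iteration.
import Mathlib
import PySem

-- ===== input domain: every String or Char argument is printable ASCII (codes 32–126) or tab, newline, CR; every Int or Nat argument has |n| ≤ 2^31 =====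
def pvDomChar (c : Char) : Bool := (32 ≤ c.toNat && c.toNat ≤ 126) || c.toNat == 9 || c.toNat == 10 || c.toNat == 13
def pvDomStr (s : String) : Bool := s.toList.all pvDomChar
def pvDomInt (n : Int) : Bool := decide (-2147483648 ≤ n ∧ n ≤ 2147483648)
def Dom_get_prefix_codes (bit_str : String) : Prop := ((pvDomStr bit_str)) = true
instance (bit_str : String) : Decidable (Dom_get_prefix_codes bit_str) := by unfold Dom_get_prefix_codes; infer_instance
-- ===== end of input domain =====

-- B re-derives each code from the previous by one in-place '*' write on a shared buffer
-- instead of A's per-iteration slice + fresh suffix; objective: alternative decomposition.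

-- ===== PORT A =====
-- for i in range(n): prefix = bit_str[:n-i]; suffix = '*'*i; append(prefix+suffix)
def get_prefix_codes (bit_str : String) : List String :=
  let n : Int := (bit_str.toList.length : Int)
  (PySem.List.pyRange 0 n 1).foldl
    (fun acc i =>
      let pfx := PySem.List.slice bit_str.toList none (some (n - i))
      let suffix := List.replicate i.toNat '*'
      acc ++ [String.ofList (pfx ++ suffix)]) []

-- ===== PORT B =====
-- buf = list(bit_str); codes = [''.join(buf)]; for i in range(1,n): buf[n-i]='*'; append join
def get_prefix_codes_alt (bit_str : String) : List String :=
  let buf := bit_str.toList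
  let n := buf.length
  if n = 0 then []
  else
    ((PySem.List.pyRange 1 (n : Int) 1).foldl
      (fun (st : List Char × List String) i =>
        let buf' := st.1.set ((n : Int) - i).toNat '*'
        (buf', st.2 ++ [String.ofList buf']))
      (buf, [String.ofList buf])).2

-- ===== PRECONDITION & SPEC =====
def Spec_get_prefix_codes (bit_str : String) (out : List String) : Prop := out = get_prefix_codes_alt bit_str
instance (bit_str : String) (out : List String) : Decidable (Spec_get_prefix_codes bit_str out) := by unfold Spec_get_prefix_codes; infer_instance

-- ===== CLAIM (what is proved, stated in full; the proofs are below) =====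
def Claim_equal_get_prefix_codes : Prop := ∀ (bit_str : String), Dom_get_prefix_codes bit_str → Spec_get_prefix_codes bit_str (get_prefix_codes bit_str)

-- ===== LEMMAS AND PROOFS =====

-- the common value: the i-th code keeps the first n-i chars and masks the last i
def pvSpecList (l : List Char) : List String :=
  (List.range l.length).map (fun i => String.ofList (l.take (l.length - i) ++ List.replicate i '*'))

theorem pv_foldl_append_map {α β : Type} (f : α → β) (xs : List α) (acc : List β) :
    xs.foldl (fun a x => a ++ [f x]) acc = acc ++ xs.map f := by
  induction xs generalizing acc with
  | nil => simp
  | cons x t ih => simp [List.foldl, ih]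

theorem pv_A_eq (s : String) : get_prefix_codes s = pvSpecList s.toList := by
  unfold get_prefix_codes pvSpecList
  dsimp only
  rw [PySem.List.pyRange_one, pv_foldl_append_map, List.map_map]
  simp only [Int.sub_zero, Int.toNat_natCast, List.nil_append]
  apply List.map_congr_left
  intro k hk
  rw [List.mem_range] at hk
  have h1 : (0 : Int) + (k : Int) = (k : Int) := by ring
  simp only [Function.comp_apply]
  rw [h1]
  have h2 : ((s.toList.length : Int) - (k : Int)) = ((s.toList.length - k : Nat) : Int) := by
    omega
  rw [h2, PySem.List.slice_to_natCast]
  simp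

theorem pv_B_loop (l : List Char) (m : Nat) (hm : m + 1 ≤ l.length) :
    (((List.range m).map (fun k => (1 : Int) + (k : Nat))).foldl
      (fun (st : List Char × List String) i =>
        let buf' := st.1.set ((l.length : Int) - i).toNat '*'
        (buf', st.2 ++ [String.ofList buf']))
      (l, [String.ofList l]))
    = (l.take (l.length - m) ++ List.replicate m '*',
       (List.range (m + 1)).map (fun i => String.ofList (l.take (l.length - i) ++ List.replicate i '*'))) := by
  induction m with
  | zero => simp
  | succ m ih =>
    have hm' : m + 1 ≤ l.length := by omega
    rw [List.range_succ, List.map_append, List.foldl_append, ih hm']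
    simp only [List.map_cons, List.map_nil, List.foldl_cons, List.foldl_nil]
    have hidx : (((l.length : Int) - ((1 : Int) + (m : Nat)))).toNat = l.length - m - 1 := by
      omega
    rw [hidx]
    have hlenbuf : (l.take (l.length - m) ++ List.replicate m '*').length = l.length := by
      simp; omega
    have hlt : l.length - m - 1 < (l.take (l.length - m) ++ List.replicate m '*').length := by
      rw [hlenbuf]; omega
    have hset : (l.take (l.length - m) ++ List.replicate m '*').set (l.length - m - 1) '*'
        = l.take (l.length - (m + 1)) ++ List.replicate (m + 1) '*' := by
      rw [List.set_eq_take_append_cons_drop, if_pos hlt]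
      have ht : (l.take (l.length - m) ++ List.replicate m '*').take (l.length - m - 1)
          = l.take (l.length - (m + 1)) := by
        rw [List.take_append_of_le_length (by simp only [List.length_take]; try omega), List.take_take]
        congr 1; omega
      have hd : (l.take (l.length - m) ++ List.replicate m '*').drop (l.length - m - 1 + 1)
          = List.replicate m '*' := by
        rw [List.drop_append_of_le_length (by simp only [List.length_take]; try omega)]
        have : (l.take (l.length - m)).length = l.length - m := by simp; try omega
        rw [List.drop_eq_nil_of_le (by omega), List.nil_append]
      rw [ht, hd]
      have : '*' :: List.replicate m '*' = List.replicate (m + 1) '*' := by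
        simp [List.replicate_succ]
      rw [this]
    rw [hset]
    rw [List.range_succ (n := m + 1)]
    simp

theorem pv_B_eq (s : String) : get_prefix_codes_alt s = pvSpecList s.toList := by
  unfold get_prefix_codes_alt pvSpecList
  by_cases h : s.toList.length = 0
  · simp [h]
  · simp only [h, if_false]
    rw [PySem.List.pyRange_one]
    have h1 : ((s.toList.length : Int) - 1).toNat = s.toList.length - 1 := by omega
    rw [h1]
    have hfun : (fun k : Nat => (1 : Int) + (k : Int)) = (fun k : Nat => (1 : Int) + (k : Nat)) := rfl
    have := pv_B_loop s.toList (s.toList.length - 1) (by omega)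
    rw [this]
    have h2 : s.toList.length - 1 + 1 = s.toList.length := by omega
    rw [h2]

-- ===== VERDICT (by name: the statement is the Claim_ definition above) =====
theorem get_prefix_codes_spec : Claim_equal_get_prefix_codes := by
  intro s _
  unfold Spec_get_prefix_codes
  rw [pv_A_eq, pv_B_eq]
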